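-- pv_equiv track=rewrite | github.com/kosmong/Multilingual_POS | Multilingual_POS.py | recombine_and_retag
-- ===== SOURCE A (Python) =====
-- def recombine_and_retag(tagged_tokens, recombine, disfluencies):
--     """token will be tagged tokens, list of pairs (word, tag)
--     if it is &, combine with next word and change tag to DIS (dispfluencies)
--     if it is @, combine with next word and change tag to LABL (label)
--     if it is part of the disfluency list, change tag to DIS"""
--     to_pop = []
--     out_tagged = tagged_tokens.copy()
--     for i in range(len(tagged_tokens)):
--         wrd = tagged_tokens[i][0]
--         pos = tagged_tokens[i][1]
--
--         if wrd in recombine: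
--             recombined_wrd = tagged_tokens[i][0] + tagged_tokens[i + 1][0]
--             to_pop.append(i + 1)
--
--             if wrd in disfluencies:
--                 out_tagged[i] = (recombined_wrd, 'DIS')
--             else:
--                 out_tagged[i] = (recombined_wrd, 'LABEL')
--
--         if wrd in disfluencies and wrd not in recombine:
--             out_tagged[i] = (wrd, 'DIS')
--
--     for p in range(len(to_pop)):
--         # have to account for shrinking array of tokens
--         # the position in the earlier will always be smaller
--         # as we remove an element from the left, the index for right elements-1
--         # p is the number of elements we have already popped
--         out_tagged.pop(to_pop[p] - p)
--
--     return out_tagged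
-- ===== SOURCE B (Python) =====
-- def recombine_and_retag(tagged_tokens, recombine, disfluencies):
--     """Single forward pass: build a fresh list, dropping a token iff the
--     previous token was a recombine marker (it got merged into it)."""
--     out = []
--     prev_recombine = False
--     for i, (wrd, pos) in enumerate(tagged_tokens):
--         if wrd in recombine:
--             merged = wrd + tagged_tokens[i + 1][0]
--             entry = (merged, 'DIS' if wrd in disfluencies else 'LABEL')
--         elif wrd in disfluencies:
--             entry = (wrd, 'DIS')
--         else:
--             entry = (wrd, pos)
--         if not prev_recombine:
--             out.append(entry)
--         prev_recombine = wrd in recombine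
--     return out
-- ===== Notes on version B (the rewrite author's own statement) =====
-- stated objective: simpler
-- what changed: Replaces A's copy + in-place retagging pass + collected to_pop index list + shrink-corrected second pop loop with a single forward pass that builds a fresh list, dropping a token exactly when the previous token was a recombine marker; Pre_ excludes only the inputs where A raises IndexError (last token's word in recombine), and B raises there too.
import Mathlib
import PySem

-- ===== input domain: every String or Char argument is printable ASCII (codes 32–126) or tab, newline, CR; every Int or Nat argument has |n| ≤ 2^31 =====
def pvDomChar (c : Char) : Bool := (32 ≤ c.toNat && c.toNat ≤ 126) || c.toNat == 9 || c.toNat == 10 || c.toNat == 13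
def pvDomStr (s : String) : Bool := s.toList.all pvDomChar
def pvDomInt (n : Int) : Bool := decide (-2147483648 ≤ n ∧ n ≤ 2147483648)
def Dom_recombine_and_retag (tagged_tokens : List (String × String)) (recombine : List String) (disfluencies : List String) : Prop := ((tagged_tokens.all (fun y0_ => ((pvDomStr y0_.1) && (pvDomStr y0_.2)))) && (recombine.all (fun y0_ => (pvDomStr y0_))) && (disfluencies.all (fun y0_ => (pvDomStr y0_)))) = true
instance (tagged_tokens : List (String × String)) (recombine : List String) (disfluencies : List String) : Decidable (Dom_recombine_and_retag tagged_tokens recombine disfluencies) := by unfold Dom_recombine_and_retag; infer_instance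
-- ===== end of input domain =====

-- B replaces A's copy/retag pass + to_pop index list + shrink-corrected pop loop with one
-- forward pass dropping a token iff its predecessor was a recombine marker (simpler).

-- ===== PORT A =====
def recombine_and_retag (tagged_tokens : List (String × String)) (recombine : List String) (disfluencies : List String) : List (String × String) :=
  -- first loop: for i in range(len(tagged_tokens)); state = (to_pop, out_tagged)
  let st := (List.range tagged_tokens.length).foldl
    (fun (st : List Nat × List (String × String)) i =>
      let wrd := (tagged_tokens.getD i ("", "")).1
      let st :=
        if wrd ∈ recombine then
          -- Python: tagged_tokens[i+1] raises IndexError when i+1 = len; excluded by Pre_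
          let recombined_wrd := (tagged_tokens.getD i ("", "")).1 ++ (tagged_tokens.getD (i + 1) ("", "")).1
          let to_pop := st.1 ++ [i + 1]
          let out_tagged := if wrd ∈ disfluencies then st.2.set i (recombined_wrd, "DIS")
                            else st.2.set i (recombined_wrd, "LABEL")
          (to_pop, out_tagged)
        else st
      if wrd ∈ disfluencies ∧ wrd ∉ recombine then (st.1, st.2.set i (wrd, "DIS")) else st)
    (([] : List Nat), tagged_tokens)
  -- second loop: for p in range(len(to_pop)): out_tagged.pop(to_pop[p] - p)
  (List.range st.1.length).foldl
    (fun out_tagged p =>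
      match PySem.List.pop? out_tagged ((st.1.getD p 0 : Int) - (p : Int)) with
      | some r => r.2
      | none => out_tagged)   -- pop's indices are always valid under Pre_; totality guard
    st.2

-- ===== PORT B =====
def pvAltLoop (recombine disfluencies : List String) : List (String × String) → Bool → List (String × String)
  | [], _ => []
  | t :: rest, prev_recombine =>
    let wrd := t.1
    let entry :=
      if wrd ∈ recombine then
        -- Python reads tagged_tokens[i+1][0] (IndexError if absent; excluded by Pre_)
        (wrd ++ (rest.headD ("", "")).1, if wrd ∈ disfluencies then "DIS" else "LABEL")
      else if wrd ∈ disfluencies then (wrd, "DIS")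
      else (wrd, t.2)
    (if prev_recombine then [] else [entry]) ++ pvAltLoop recombine disfluencies rest (decide (wrd ∈ recombine))

def recombine_and_retag_alt (tagged_tokens : List (String × String)) (recombine : List String) (disfluencies : List String) : List (String × String) :=
  pvAltLoop recombine disfluencies tagged_tokens false

-- ===== PRECONDITION & SPEC =====
-- Pre_ excludes exactly the inputs on which Python A raises IndexError:
-- a non-empty token list whose LAST token's word is in recombine (tagged_tokens[i+1]).
def Pre_recombine_and_retag (tagged_tokens : List (String × String)) (recombine : List String) (disfluencies : List String) : Prop :=
  (tagged_tokens.getLast?.all (fun t => decide (t.1 ∉ recombine))) = true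
instance (tagged_tokens : List (String × String)) (recombine : List String) (disfluencies : List String) : Decidable (Pre_recombine_and_retag tagged_tokens recombine disfluencies) := by unfold Pre_recombine_and_retag; infer_instance

def pvWitness_recombine_and_retag : (List (String × String)) × List String × List String :=
  ([("&", "X"), ("uh", "N"), ("ok", "V")], ["&"], ["uh"])

def Spec_recombine_and_retag (tagged_tokens : List (String × String)) (recombine : List String) (disfluencies : List String) (out : List (String × String)) : Prop := out = recombine_and_retag_alt tagged_tokens recombine disfluencies
instance (tagged_tokens : List (String × String)) (recombine : List String) (disfluencies : List String) (out : List (String × String)) : Decidable (Spec_recombine_and_retag tagged_tokens recombine disfluencies out) := by unfold Spec_recombine_and_retag; infer_instance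

-- ===== CLAIM (what is proved, stated in full; the proofs are below) =====
def Claim_equal_recombine_and_retag : Prop := ∀ (tagged_tokens : List (String × String)) (recombine : List String) (disfluencies : List String), Dom_recombine_and_retag tagged_tokens recombine disfluencies → Pre_recombine_and_retag tagged_tokens recombine disfluencies → Spec_recombine_and_retag tagged_tokens recombine disfluencies (recombine_and_retag tagged_tokens recombine disfluencies)

-- ===== LEMMAS AND PROOFS =====

def pvD : String × String := ("", "")

-- the value A leaves (and B computes) at original position i
def pvEntry (tt : List (String × String)) (recombine disfluencies : List String) (i : Nat) : String × String :=
  let wrd := (tt.getD i pvD).1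
  if wrd ∈ recombine then
    (wrd ++ (tt.getD (i + 1) pvD).1, if wrd ∈ disfluencies then "DIS" else "LABEL")
  else if wrd ∈ disfluencies then (wrd, "DIS")
  else tt.getD i pvD

def pvPopN (tt : List (String × String)) (recombine : List String) (n : Nat) : List Nat :=
  ((List.range n).filter (fun i => decide ((tt.getD i pvD).1 ∈ recombine))).map (· + 1)

def pvOutN (tt : List (String × String)) (recombine disfluencies : List String) (n : Nat) : List (String × String) :=
  (List.range tt.length).map (fun i => if i < n then pvEntry tt recombine disfluencies i else tt.getD i pvD)

-- drop the elements whose absolute position (starting at p) is in S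
def pvKeep (S : List Nat) : List (String × String) → Nat → List (String × String)
  | [], _ => []
  | x :: xs, p => (if p ∈ S then [] else [x]) ++ pvKeep S xs (p + 1)

-- A's pop loop, recursively over the index list
def pvPopRec : List Nat → Nat → List (String × String) → List (String × String)
  | [], _, out => out
  | s :: S, k, out =>
    pvPopRec S (k + 1)
      (match PySem.List.pop? out ((s : Int) - (k : Int)) with
       | some r => r.2
       | none => out)

lemma pv_outN_zero (tt : List (String × String)) (r d : List String) : pvOutN tt r d 0 = tt := by
  apply List.ext_getElem
  · simp [pvOutN]
  · intro i h1 h2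
    simp only [pvOutN, List.getElem_map, List.getElem_range, Nat.not_lt_zero, if_false, List.getD]
    rw [List.getElem?_eq_getElem h2]; rfl

lemma pv_outN_succ (tt : List (String × String)) (r d : List String) (n : Nat) (hn : n < tt.length) :
    pvOutN tt r d (n+1) = (pvOutN tt r d n).set n (pvEntry tt r d n) := by
  apply List.ext_getElem
  · simp [pvOutN]
  · intro i h1 h2
    simp only [pvOutN, List.getElem_map, List.getElem_range] at *
    rw [List.getElem_set]
    by_cases hin : n = i
    · subst hin; simp
    · simp only [if_neg hin, List.getElem_map, List.getElem_range]
      have : (i < n + 1) ↔ (i < n) := by simp [pvOutN] at h1; omega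
      simp [this]

lemma pv_popN_succ (tt : List (String × String)) (r : List String) (n : Nat) :
    pvPopN tt r (n+1) = pvPopN tt r n ++ (if (tt.getD n pvD).1 ∈ r then [n+1] else []) := by
  simp only [pvPopN, List.range_succ, List.filter_append, List.map_append]
  congr 1
  by_cases h : (tt.getD n pvD).1 ∈ r <;>
    · simp only [List.getD] at h
      simp [h, List.getD]

lemma pv_passA (tt : List (String × String)) (recombine disfluencies : List String) :
    ∀ n, n ≤ tt.length →
    (List.range n).foldl
      (fun (st : List Nat × List (String × String)) i =>
        let wrd := (tt.getD i ("", "")).1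
        let st :=
          if wrd ∈ recombine then
            let recombined_wrd := (tt.getD i ("", "")).1 ++ (tt.getD (i + 1) ("", "")).1
            let to_pop := st.1 ++ [i + 1]
            let out_tagged := if wrd ∈ disfluencies then st.2.set i (recombined_wrd, "DIS")
                              else st.2.set i (recombined_wrd, "LABEL")
            (to_pop, out_tagged)
          else st
        if wrd ∈ disfluencies ∧ wrd ∉ recombine then (st.1, st.2.set i (wrd, "DIS")) else st)
      (([] : List Nat), tt)
    = (pvPopN tt recombine n, pvOutN tt recombine disfluencies n) := by
  intro n
  induction n with
  | zero => intro _; simp [pvPopN, pv_outN_zero]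
  | succ n ih =>
    intro hn
    rw [List.range_succ, List.foldl_append, List.foldl_cons, List.foldl_nil, ih (by omega)]
    have hnlen : n < tt.length := by omega
    rw [pv_outN_succ tt recombine disfluencies n hnlen, pv_popN_succ]
    show (let wrd := (tt.getD n ("", "")).1
          let st :=
            if wrd ∈ recombine then
              let recombined_wrd := (tt.getD n ("", "")).1 ++ (tt.getD (n + 1) ("", "")).1
              let to_pop := (pvPopN tt recombine n) ++ [n + 1]
              let out_tagged := if wrd ∈ disfluencies then (pvOutN tt recombine disfluencies n).set n (recombined_wrd, "DIS")
                                else (pvOutN tt recombine disfluencies n).set n (recombined_wrd, "LABEL")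
              (to_pop, out_tagged)
            else (pvPopN tt recombine n, pvOutN tt recombine disfluencies n)
          if wrd ∈ disfluencies ∧ wrd ∉ recombine then (st.1, st.2.set n (wrd, "DIS")) else st)
        = _
    have hself : (pvOutN tt recombine disfluencies n).set n (tt[n]?.getD ("", "")) = pvOutN tt recombine disfluencies n := by
      have hlen' : n < (pvOutN tt recombine disfluencies n).length := by simp [pvOutN]; omega
      have : (pvOutN tt recombine disfluencies n)[n] = tt[n]?.getD ("", "") := by
        simp [pvOutN, hnlen, pvD]
      rw [← this, List.set_getElem_self hlen']
    by_cases h1 : (tt[n]?.getD ("", "")).1 ∈ recombine <;>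
      by_cases h2 : (tt[n]?.getD ("", "")).1 ∈ disfluencies <;>
        simp [h1, h2, pvEntry, pvD, hself, List.getD]

lemma pv_keep_nil (xs : List (String × String)) : ∀ p, pvKeep [] xs p = xs := by
  induction xs with
  | nil => intro p; rfl
  | cons x xs ih => intro p; simp [pvKeep, ih]

lemma pv_keep_cons_of_lt (s : Nat) (S : List Nat) (xs : List (String × String)) :
    ∀ p, s < p → pvKeep (s :: S) xs p = pvKeep S xs p := by
  induction xs with
  | nil => intro p _; rfl
  | cons x xs ih =>
    intro p hp
    simp only [pvKeep, List.mem_cons, ih (p+1) (by omega)]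
    have : ¬ p = s := by omega
    simp [this]

lemma pv_erase_keep (s : Nat) (S : List Nat) (hS : ∀ t ∈ S, s < t) :
    ∀ (xs : List (String × String)) (k : Nat), k ≤ s → s - k < xs.length →
    pvKeep S (xs.eraseIdx (s - k)) (k + 1) = pvKeep (s :: S) xs k := by
  intro xs
  induction xs with
  | nil => intro k _ h; simp at h
  | cons x xs ih =>
    intro k hk hlen
    by_cases hks : k = s
    · subst hks
      simp only [Nat.sub_self, List.eraseIdx_cons_zero]
      rw [pvKeep, if_pos (by simp)]
      rw [pv_keep_cons_of_lt _ S xs _ (by omega)]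
      rfl
    · have hlt : k < s := by omega
      have hsk : s - k = (s - (k+1)) + 1 := by omega
      rw [hsk, List.eraseIdx_cons_succ]
      rw [pvKeep, pvKeep]
      have h1 : ¬ (k + 1) ∈ S := fun h => by have := hS _ h; omega
      have h2 : ¬ k ∈ (s :: S) := by
        simp only [List.mem_cons]; rintro (h | h); omega; exact absurd (hS _ h) (by omega)
      rw [if_neg h1, if_neg h2]
      congr 1
      exact ih (k+1) (by omega) (by simp at hlen ⊢; omega)

lemma pv_popRec_keep :
    ∀ (S : List Nat), S.Pairwise (· < ·) →
    ∀ (k : Nat) (out : List (String × String)), (∀ s ∈ S, k ≤ s ∧ s < k + out.length) →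
    pvPopRec S k out = pvKeep S out k := by
  intro S
  induction S with
  | nil => intro _ k out _; exact (pv_keep_nil out k).symm
  | cons s S ih =>
    intro hpw k out hb
    have hs := hb s (by simp)
    have hsk : s - k < out.length := by omega
    have hcast : (s : Int) - (k : Int) = ((s - k : Nat) : Int) := by omega
    rw [pvPopRec, hcast, PySem.List.pop?_natCast out (s-k) hsk]
    have hS' : ∀ t ∈ S, s < t := by
      intro t ht; exact (List.pairwise_cons.mp hpw).1 t ht
    have hb' : ∀ t ∈ S, k + 1 ≤ t ∧ t < (k + 1) + (out.eraseIdx (s - k)).length := by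
      intro t ht
      have := hb t (by simp [ht])
      have h1 := hS' t ht
      rw [List.length_eraseIdx_of_lt hsk]
      omega
    rw [ih (List.pairwise_cons.mp hpw).2 (k+1) _ hb']
    exact pv_erase_keep s S hS' out k hs.1 hsk

lemma pv_rangeFold_popRec (S : List Nat) :
    ∀ (k : Nat) (out : List (String × String)),
    (List.range S.length).foldl
      (fun out_tagged p =>
        match PySem.List.pop? out_tagged ((S.getD p 0 : Int) - ((p : Int) + (k : Int))) with
        | some r => r.2
        | none => out_tagged) out
    = pvPopRec S k out := by
  induction S with
  | nil => intro k out; rfl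
  | cons s S ih =>
    intro k out
    rw [List.length_cons, List.range_succ_eq_map, List.foldl_cons, List.foldl_map]
    rw [pvPopRec]
    have hfun : (fun (o : List (String × String)) (p : Nat) =>
        (match PySem.List.pop? o (((s :: S).getD (Nat.succ p) 0 : Int) - (((Nat.succ p) : Int) + (k : Int))) with
         | some r => r.2
         | none => o))
      = (fun (o : List (String × String)) (p : Nat) =>
        (match PySem.List.pop? o ((S.getD p 0 : Int) - ((p : Int) + ((k+1 : Nat) : Int))) with
         | some r => r.2
         | none => o)) := by
      funext o p
      have : (((s :: S).getD (Nat.succ p) 0 : Nat) : Int) - (((Nat.succ p) : Int) + (k : Int))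
           = ((S.getD p 0 : Nat) : Int) - ((p : Int) + ((k+1 : Nat) : Int)) := by
        simp; ring
      rw [this]
    have hfirst : (match PySem.List.pop? out (((s :: S).getD 0 0 : Int) - (((0:Nat) : Int) + (k : Int))) with
         | some r => r.2
         | none => out)
        = (match PySem.List.pop? out ((s : Int) - (k : Int)) with
         | some r => r.2
         | none => out) := by
      rw [show (((s :: S).getD 0 0 : Nat) : Int) - (((0:Nat) : Int) + (k : Int)) = (s : Int) - (k : Int) by simp]
    rw [hfirst, hfun, ih (k+1)]

lemma pv_rangeFold_popRec0 (S : List Nat) (out : List (String × String)) :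
    (List.range S.length).foldl
      (fun out_tagged p =>
        match PySem.List.pop? out_tagged ((S.getD p 0 : Int) - (p : Int)) with
        | some r => r.2
        | none => out_tagged) out
    = pvPopRec S 0 out := by
  rw [← pv_rangeFold_popRec S 0 out]
  congr 1

lemma pv_mem_popN (tt : List (String × String)) (r : List String) (n x : Nat) :
    x ∈ pvPopN tt r n ↔ ∃ i, i < n ∧ x = i + 1 ∧ (tt.getD i pvD).1 ∈ r := by
  simp only [pvPopN, List.mem_map, List.mem_filter, List.mem_range, decide_eq_true_eq]
  constructor
  · rintro ⟨i, ⟨hi, hr⟩, rfl⟩; exact ⟨i, hi, rfl, hr⟩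
  · rintro ⟨i, hi, rfl, hr⟩; exact ⟨i, ⟨hi, hr⟩, rfl⟩

lemma pv_pairwise_popN (tt : List (String × String)) (r : List String) (n : Nat) :
    (pvPopN tt r n).Pairwise (· < ·) := by
  apply List.Pairwise.map
  · intro a b (h : a < b); omega
  · exact List.Pairwise.filter _ List.pairwise_lt_range

def pvPrev (tt : List (String × String)) (recombine : List String) (m : Nat) : Bool :=
  decide (0 < m ∧ (tt.getD (m-1) pvD).1 ∈ recombine)

lemma pv_prev_eq_mem (tt : List (String × String)) (recombine : List String) (m : Nat) (hm : m ≤ tt.length) :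
    pvPrev tt recombine m = true ↔ m ∈ pvPopN tt recombine tt.length := by
  rw [pv_mem_popN, pvPrev]
  simp only [decide_eq_true_eq]
  constructor
  · rintro ⟨h0, hr⟩; exact ⟨m - 1, by omega, by omega, hr⟩
  · rintro ⟨i, hi, rfl, hr⟩; exact ⟨by omega, by simpa using hr⟩

lemma pv_altChar (tt : List (String × String)) (recombine disfluencies : List String) :
    ∀ j m, tt.length - m = j → m ≤ tt.length →
    pvAltLoop recombine disfluencies (tt.drop m) (pvPrev tt recombine m)
    = pvKeep (pvPopN tt recombine tt.length) ((pvOutN tt recombine disfluencies tt.length).drop m) m := by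
  intro j
  induction j with
  | zero =>
    intro m hj hm
    have hm' : m = tt.length := by omega
    subst hm'
    rw [List.drop_of_length_le (le_refl _), List.drop_of_length_le (by simp [pvOutN])]
    rfl
  | succ j ih =>
    intro m hj hm
    have hmlt : m < tt.length := by omega
    have hE : m < (pvOutN tt recombine disfluencies tt.length).length := by simp [pvOutN]; omega
    rw [List.drop_eq_getElem_cons hmlt, List.drop_eq_getElem_cons hE]
    rw [pvAltLoop, pvKeep]
    have hEm : (pvOutN tt recombine disfluencies tt.length)[m] = pvEntry tt recombine disfluencies m := by
      simp [pvOutN, hmlt]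
    have hgd : tt.getD m pvD = tt[m] := List.getD_eq_getElem tt pvD hmlt
    have hentry :
        (let wrd := (tt[m]).1
         if wrd ∈ recombine then
           (wrd ++ (((tt.drop (m+1)).headD ("", ""))).1, if wrd ∈ disfluencies then "DIS" else "LABEL")
         else if wrd ∈ disfluencies then (wrd, "DIS")
         else (wrd, (tt[m]).2))
        = pvEntry tt recombine disfluencies m := by
      have hhead : (tt.drop (m+1)).headD ("", "") = tt.getD (m+1) pvD := by
        rw [List.headD_eq_head?_getD, List.head?_drop]; rfl
      have hq : tt[m]?.getD ("", "") = tt[m] := by rw [List.getElem?_eq_getElem hmlt]; rfl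
      simp only [pvEntry, hhead, pvD]
      by_cases h1 : (tt[m]).1 ∈ recombine <;> by_cases h2 : (tt[m]).1 ∈ disfluencies <;>
        simp [h1, h2, hq, List.getD]
    rw [hentry, hEm]
    have hrec : (decide ((tt[m]).1 ∈ recombine)) = pvPrev tt recombine (m+1) := by
      simp only [pvPrev]
      have : (0 < m + 1 ∧ (tt.getD (m+1-1) pvD).1 ∈ recombine) ↔ ((tt[m]).1 ∈ recombine) := by
        rw [show m+1-1 = m from rfl, List.getD_eq_getElem tt pvD hmlt]
        simp
      rw [decide_eq_decide.mpr this]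
    rw [hrec, ih (m+1) (by omega) (by omega)]
    congr 1
    by_cases hp : pvPrev tt recombine m = true
    · rw [hp, if_pos ((pv_prev_eq_mem tt recombine m (by omega)).mp hp)]
      simp
    · rw [Bool.not_eq_true] at hp
      have hmem : m ∉ pvPopN tt recombine tt.length := fun hmem => by
        have := (pv_prev_eq_mem tt recombine m (by omega)).mpr hmem
        simp [hp] at this
      simp [hp, hmem]

lemma pv_bounds (tt : List (String × String)) (recombine disfluencies : List String)
    (hpre : Pre_recombine_and_retag tt recombine disfluencies) :
    ∀ s ∈ pvPopN tt recombine tt.length,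
      0 ≤ s ∧ s < 0 + (pvOutN tt recombine disfluencies tt.length).length := by
  intro s hs
  rw [pv_mem_popN] at hs
  obtain ⟨i, hi, rfl, hr⟩ := hs
  have hlen : (pvOutN tt recombine disfluencies tt.length).length = tt.length := by simp [pvOutN]
  refine ⟨by omega, ?_⟩
  rw [hlen]
  by_contra hcon
  have hieq : i = tt.length - 1 := by omega
  have hne : tt ≠ [] := by intro h; subst h; simp at hi
  have hgl : tt.getLast? = some tt[tt.length - 1] := by
    rw [List.getLast?_eq_getElem?, List.getElem?_eq_getElem (by omega)]
  unfold Pre_recombine_and_retag at hpre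
  rw [hgl] at hpre
  simp only [Option.all_some, decide_eq_true_eq] at hpre
  apply hpre
  have h := hr
  rw [List.getD_eq_getElem tt pvD hi] at h
  subst hieq
  exact h

-- ===== VERDICT (by name: the statement is the Claim_ definition above) =====
theorem recombine_and_retag_spec : Claim_equal_recombine_and_retag := by
  intro tt recombine disfluencies _ hpre
  show recombine_and_retag tt recombine disfluencies = recombine_and_retag_alt tt recombine disfluencies
  rw [recombine_and_retag, recombine_and_retag_alt]
  rw [pv_passA tt recombine disfluencies tt.length (le_refl _)]
  rw [pv_rangeFold_popRec0]
  rw [pv_popRec_keep (pvPopN tt recombine tt.length) (pv_pairwise_popN tt recombine tt.length) 0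
    (pvOutN tt recombine disfluencies tt.length) (pv_bounds tt recombine disfluencies hpre)]
  have := pv_altChar tt recombine disfluencies tt.length 0 (by omega) (by omega)
  simp only [List.drop_zero] at this
  rw [show pvAltLoop recombine disfluencies tt false = pvAltLoop recombine disfluencies tt (pvPrev tt recombine 0) by rfl]
  rw [this]
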